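-- pv_equiv track=rewrite | github.com/larry109/GENRISK | app.py | trouver_motifs_repetes
-- ===== SOURCE A (Python) =====
-- def trouver_motifs_repetes(sequence, longueur_motif):
--     motifs = {}
--     for i in range(len(sequence) - longueur_motif + 1):
--         motif = sequence[i:i+longueur_motif]
--         if motif in motifs:
--             motifs[motif] += 1
--         else:
--             motifs[motif] = 1
--     return {k: v for k, v in motifs.items() if v > 1}
-- ===== SOURCE B (Python) =====
-- def trouver_motifs_repetes(sequence, longueur_motif):
--     subs = [sequence[i:i+longueur_motif] for i in range(len(sequence) - longueur_motif + 1)]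
--     ordered = sorted(subs)
--     n = len(ordered)
--     counts = {}
--     i = 0
--     while i < n:
--         m = ordered[i]
--         j = i + 1
--         while j < n and ordered[j] == m:
--             j += 1
--         counts[m] = j - i
--         i = j
--     return {m: c for m in dict.fromkeys(subs) if (c := counts.get(m, 0)) > 1}
-- ===== Notes on version B (the rewrite author's own statement) =====
-- stated objective: alternative
-- what changed: Replaces A's single-pass mutable hash-counter with the sort-then-scan decomposition: materialize all windows, sort them, tally adjacent equal runs, then emit counts > 1 in first-occurrence window order.
import Mathlib
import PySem

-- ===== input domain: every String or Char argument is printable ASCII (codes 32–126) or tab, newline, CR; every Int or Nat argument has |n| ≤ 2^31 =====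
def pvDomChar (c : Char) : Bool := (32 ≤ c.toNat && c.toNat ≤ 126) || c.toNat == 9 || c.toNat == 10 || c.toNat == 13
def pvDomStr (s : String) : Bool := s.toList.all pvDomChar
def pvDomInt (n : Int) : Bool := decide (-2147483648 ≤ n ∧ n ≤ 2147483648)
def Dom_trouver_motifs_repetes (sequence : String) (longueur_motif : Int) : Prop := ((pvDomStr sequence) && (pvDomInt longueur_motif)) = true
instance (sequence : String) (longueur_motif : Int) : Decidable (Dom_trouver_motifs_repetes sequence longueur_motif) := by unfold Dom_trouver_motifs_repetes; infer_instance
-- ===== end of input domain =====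

-- B replaces A's single-pass hash counter with sort-then-scan run tallying plus an ordered-dedup emission pass (alternative decomposition, not faster).


-- ===== PORT A =====
def trouver_motifs_repetes (sequence : String) (longueur_motif : Int) : List (String × Int) :=
  let motifs : PySem.Dict String Int :=
    (PySem.List.pyRange 0 ((PySem.Str.len sequence : Int) - longueur_motif + 1) 1).foldl
      (fun d i =>
        let motif := PySem.Str.slice sequence (some i) (some (i + longueur_motif))
        if d.contains motif then d.insert motif (d.getD motif 0 + 1)
        else d.insert motif 1)
      PySem.Dict.empty
  motifs.items.filter (fun kv => decide (1 < kv.2))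

-- ===== PORT B =====
-- Source B's while loop over the sorted list: each step consumes one maximal run
-- (the inner 'while ordered[j] == ordered[i]' scan is the takeWhile/dropWhile split)
-- and records (run head, run length) in counts.
def pvRunsLoop (counts : PySem.Dict String Int) : List String → PySem.Dict String Int
  | [] => counts
  | x :: t =>
      pvRunsLoop (counts.insert x (((t.takeWhile (· == x)).length : Int) + 1)) (t.dropWhile (· == x))
  termination_by l => l.length
  decreasing_by
    simp only [List.length_cons]
    exact Nat.lt_succ_of_le ((List.dropWhile_sublist _).length_le)

def trouver_motifs_repetes_alt (sequence : String) (longueur_motif : Int) : List (String × Int) :=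
  let subs :=
    (PySem.List.pyRange 0 ((PySem.Str.len sequence : Int) - longueur_motif + 1) 1).map
      (fun i => PySem.Str.slice sequence (some i) (some (i + longueur_motif)))
  let counts := pvRunsLoop PySem.Dict.empty (PySem.List.sorted subs (fun m => m))
  (PySem.List.dedup subs).filterMap
    (fun m => if 1 < counts.getD m 0 then some (m, counts.getD m 0) else none)

-- ===== PRECONDITION & SPEC =====
def Spec_trouver_motifs_repetes (sequence : String) (longueur_motif : Int) (out : List (String × Int)) : Prop := out = trouver_motifs_repetes_alt sequence longueur_motif
instance (sequence : String) (longueur_motif : Int) (out : List (String × Int)) : Decidable (Spec_trouver_motifs_repetes sequence longueur_motif out) := by unfold Spec_trouver_motifs_repetes; infer_instance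

-- ===== CLAIM (what is proved, stated in full; the proofs are below) =====
def Claim_equal_trouver_motifs_repetes : Prop := ∀ (sequence : String) (longueur_motif : Int), Dom_trouver_motifs_repetes sequence longueur_motif → Spec_trouver_motifs_repetes sequence longueur_motif (trouver_motifs_repetes sequence longueur_motif)

-- ===== LEMMAS AND PROOFS =====

-- A's branch ('seen before: +1, else 1') is exactly the Counter update step.
lemma counter_step_eq (d : PySem.Dict String Int) (m : String) :
    (if d.contains m then d.insert m (d.getD m 0 + 1) else d.insert m 1)
      = d.insert m (d.getD m 0 + 1) := by
  by_cases h : d.contains m = true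
  · simp [h]
  · have hnone : d.get? m = none := by
      have := PySem.Dict.contains_eq_isSome_get? d m
      rw [this] at h
      cases hg : d.get? m with
      | none => rfl
      | some v => rw [hg] at h; simp at h
    simp [h, PySem.Dict.getD, hnone]

-- filtering a mapped list is the filterMap of the composite
lemma filter_map_eq_filterMap {α β : Type} (l : List α) (f : α → β) (p : β → Bool) :
    (l.map f).filter p = l.filterMap (fun x => if p (f x) then some (f x) else none) := by
  induction l with
  | nil => rfl
  | cons a t ih =>
      simp only [List.map_cons, List.filter_cons, List.filterMap_cons]
      by_cases h : p (f a) = true <;> simp [h, ih]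

-- run tallying over a ≤-sorted list yields exactly the multiplicity of each element
lemma pvRunsLoop_getD (l : List String) (h : List.Pairwise (· ≤ ·) l)
    (d : PySem.Dict String Int) (m : String) :
    (pvRunsLoop d l).getD m 0 = if m ∈ l then (l.count m : Int) else d.getD m 0 := by
  induction d, l using pvRunsLoop.induct with
  | case1 d => simp [pvRunsLoop]
  | case2 d x t ih =>
      have hx : ∀ y ∈ t, x ≤ y := (List.pairwise_cons.mp h).1
      have ht : List.Pairwise (· ≤ ·) t := (List.pairwise_cons.mp h).2
      have hrest : List.Pairwise (· ≤ ·) (t.dropWhile (· == x)) :=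
        List.Pairwise.sublist (List.dropWhile_sublist _) ht
      -- every element of the takeWhile prefix is x
      have hsame : ∀ y ∈ t.takeWhile (· == x), y = x := by
        intro y hy
        exact eq_of_beq (List.mem_takeWhile_imp (p := (· == x)) (l := t) hy)
      -- every element of the dropped suffix is strictly greater than x
      have hgt : ∀ z ∈ t.dropWhile (· == x), x < z := by
        cases hr : t.dropWhile (· == x) with
        | nil => intro z hz; simp at hz
        | cons z0 r =>
            have hz0ne : z0 ≠ x := by
              have hhd := List.head_dropWhile_not (· == x) (l := t) (w := by simp [hr])
              simp only [hr, List.head_cons] at hhd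
              simpa using hhd
            have hz0d : z0 ∈ t.dropWhile (· == x) := by rw [hr]; simp
            have hz0mem : z0 ∈ t := (List.dropWhile_sublist _).mem hz0d
            have hz0 : x < z0 := lt_of_le_of_ne (hx z0 hz0mem) (Ne.symm hz0ne)
            intro z hz
            rcases List.mem_cons.mp hz with rfl | hzr
            · exact hz0
            · have hp : List.Pairwise (· ≤ ·) (z0 :: r) := hr ▸ hrest
              exact lt_of_lt_of_le hz0 ((List.pairwise_cons.mp hp).1 z hzr)
      have hxnr : x ∉ t.dropWhile (· == x) := fun hmem => lt_irrefl x (hgt x hmem)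
      have hsplit : t.takeWhile (· == x) ++ t.dropWhile (· == x) = t :=
        List.takeWhile_append_dropWhile
      rw [pvRunsLoop, ih hrest]
      by_cases hmx : m = x
      · subst hmx
        have h1 : (t.takeWhile (· == m)).count m = (t.takeWhile (· == m)).length :=
          List.count_eq_length.mpr (fun b hb => (hsame b hb).symm)
        have h2 : (t.dropWhile (· == m)).count m = 0 := List.count_eq_zero.mpr hxnr
        have hc := congrArg (List.count m) hsplit
        rw [List.count_append, h1, h2] at hc
        have hcnt : (m :: t).count m = (t.takeWhile (· == m)).length + 1 := by
          rw [List.count_cons_self]; omega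
        simp [hxnr, hcnt]
      · have hmnotsame : m ∉ t.takeWhile (· == x) := fun hm => hmx (hsame m hm)
        have h1 : (t.takeWhile (· == x)).count m = 0 :=
          List.count_eq_zero.mpr hmnotsame
        have hc := congrArg (List.count m) hsplit
        rw [List.count_append, h1] at hc
        by_cases hmr : m ∈ t.dropWhile (· == x)
        · have hml : m ∈ x :: t := by
            refine List.mem_cons_of_mem _ ?_
            rw [← hsplit]
            exact List.mem_append_right _ hmr
          have hcnt : (x :: t).count m = (t.dropWhile (· == x)).count m := by
            simp [Ne.symm hmx]
            omega
          simp [hmr, hml, hcnt]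
        · have hml : m ∉ x :: t := by
            intro hm
            rcases List.mem_cons.mp hm with rfl | hmt
            · exact hmx rfl
            · rw [← hsplit] at hmt
              rcases List.mem_append.mp hmt with ha | hb
              · exact hmnotsame ha
              · exact hmr hb
          simp [hmr, hml, PySem.Dict.getD_insert, hmx]

-- ===== VERDICT (by name: the statement is the Claim_ definition above) =====
theorem trouver_motifs_repetes_spec : Claim_equal_trouver_motifs_repetes := by
  intro sequence longueur_motif _
  unfold Spec_trouver_motifs_repetes trouver_motifs_repetes trouver_motifs_repetes_alt
  simp only []
  set R := PySem.List.pyRange 0 ((PySem.Str.len sequence : Int) - longueur_motif + 1) 1 with hR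
  set f := fun i => PySem.Str.slice sequence (some i) (some (i + longueur_motif)) with hf
  set subs := R.map f with hsubs
  -- A's loop is Counter(subs)
  have hfun :
      (fun (d : PySem.Dict String Int) i =>
          let motif := f i
          if d.contains motif then d.insert motif (d.getD motif 0 + 1)
          else d.insert motif 1)
        = (fun (d : PySem.Dict String Int) i => d.insert (f i) (d.getD (f i) 0 + 1)) := by
    funext d i
    exact counter_step_eq d (f i)
  have hfold :
      R.foldl (fun d i =>
          let motif := f i
          if d.contains motif then d.insert motif (d.getD motif 0 + 1)
          else d.insert motif 1) PySem.Dict.empty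
        = PySem.Dict.counter subs := by
    have hm := List.foldl_map (f := f)
      (g := fun (d : PySem.Dict String Int) m => d.insert m (d.getD m 0 + 1))
      (l := R) (init := PySem.Dict.empty)
    rw [hfun, ← hm, PySem.Dict.foldl_insert_getD_add_one_eq_counter]
  rw [hfold, PySem.Dict.items_counter, ← PySem.List.dedup_eq_ofList]
  rw [filter_map_eq_filterMap]
  -- B's run tally over the sorted windows looks up to the same multiplicities
  have hperm : (PySem.List.sorted subs (fun m => m)).Perm subs :=
    PySem.List.sorted_perm subs (fun m => m) false
  have hcounts : ∀ m : String,
      (pvRunsLoop PySem.Dict.empty (PySem.List.sorted subs (fun m => m))).getD m 0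
        = (subs.count m : Int) := by
    intro m
    have hpw : List.Pairwise (· ≤ ·) (PySem.List.sorted subs (fun m => m)) := by
      simpa using PySem.List.sorted_pairwise subs (fun m => m)
    rw [pvRunsLoop_getD _ hpw]
    by_cases hm : m ∈ PySem.List.sorted subs (fun m => m)
    · simp [hm, hperm.count_eq m]
    · have : m ∉ subs := fun h => hm (hperm.mem_iff.mpr h)
      simp [hm, List.count_eq_zero.mpr this]
  apply List.filterMap_congr
  intro m _
  rw [hcounts m]
  by_cases h : (1 : Int) < subs.count m <;> simp [h]
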